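-- pv_equiv track=rewrite | github.com/vatsalllll/StratergyVault | backend/src/api/strategies.py | _generate_month_labels
-- ===== SOURCE A (Python) =====
-- def _generate_month_labels(count: int) -> list:
--     """Generate month labels for chart display."""
--     labels = []
--     months = ["Jan", "Feb", "Mar", "Apr", "May", "Jun",
--               "Jul", "Aug", "Sep", "Oct", "Nov", "Dec"]
--     year = 24
--     for i in range(count):
--         m = i % 12
--         y = year + i // 12
--         labels.append(f"{months[m]}'{y}")
--     return labels
-- ===== SOURCE B (Python) =====
-- def _generate_month_labels(count: int) -> list:
--     """Generate month labels for chart display."""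
--     months = ["Jan", "Feb", "Mar", "Apr", "May", "Jun",
--               "Jul", "Aug", "Sep", "Oct", "Nov", "Dec"]
--     if count <= 0:
--         return []
--     years = (count + 11) // 12
--     full = [m + suffix
--             for suffix in ("'" + str(24 + y) for y in range(years))
--             for m in months]
--     return full[:count]
-- ===== Notes on version B (the rewrite author's own statement) =====
-- stated objective: alternative
-- what changed: B builds one whole year of labels at a time with a comprehension (the year suffix string computed once per year) and slices the list down to count, instead of computing the month index and year by division for every index; measured somewhat faster but below the 1.5x bar, so no speed is claimed.
import Mathlib
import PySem

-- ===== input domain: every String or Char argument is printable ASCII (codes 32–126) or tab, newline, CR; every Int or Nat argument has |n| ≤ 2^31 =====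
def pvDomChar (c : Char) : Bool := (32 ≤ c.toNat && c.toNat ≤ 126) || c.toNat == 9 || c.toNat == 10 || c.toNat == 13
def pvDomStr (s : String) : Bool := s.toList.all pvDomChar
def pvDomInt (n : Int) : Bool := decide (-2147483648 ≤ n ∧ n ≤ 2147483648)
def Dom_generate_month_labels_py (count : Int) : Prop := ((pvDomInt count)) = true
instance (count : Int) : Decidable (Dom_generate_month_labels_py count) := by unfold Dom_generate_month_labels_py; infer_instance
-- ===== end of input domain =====

-- B builds whole years of labels at a time (year suffix computed once per year) and
-- truncates to count, instead of A's per-index month/year division.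

-- ===== PORT A =====
def pvMonths : List String :=
  ["Jan", "Feb", "Mar", "Apr", "May", "Jun", "Jul", "Aug", "Sep", "Oct", "Nov", "Dec"]

-- literal port of A: for i in range(count): labels.append(months[i%12] + "'" + str(24 + i//12)).
-- months[m] is ported as (pyGet? …).getD ""; exact since 0 ≤ i % 12 < 12 = len(months), so Python never raises here.
def generate_month_labels_py (count : Int) : List String :=
  (PySem.List.pyRange 0 count 1).foldl
    (fun labels i =>
      let m := PySem.Int.mod i 12
      let y := 24 + PySem.Int.floordiv i 12
      labels ++ [((PySem.List.pyGet? pvMonths m).getD "") ++ "'" ++ PySem.Int.toStr y])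
    []

-- ===== PORT B =====
-- literal port of Source B: early return on count <= 0; build years of 12 labels; slice full[:count].
def generate_month_labels_py_alt (count : Int) : List String :=
  if count ≤ 0 then []
  else
    let years := PySem.Int.floordiv (count + 11) 12
    let full := (PySem.List.pyRange 0 years 1).flatMap
      (fun y =>
        let suffix := "'" ++ PySem.Int.toStr (24 + y)
        pvMonths.map (fun m => m ++ suffix))
    PySem.List.slice full none (some count)

-- ===== PRECONDITION & SPEC =====
def Spec_generate_month_labels_py (count : Int) (out : List String) : Prop := out = generate_month_labels_py_alt count
instance (count : Int) (out : List String) : Decidable (Spec_generate_month_labels_py count out) := by unfold Spec_generate_month_labels_py; infer_instance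

-- ===== CLAIM (what is proved, stated in full; the proofs are below) =====
def Claim_equal_generate_month_labels_py : Prop := ∀ (count : Int), Dom_generate_month_labels_py count → Spec_generate_month_labels_py count (generate_month_labels_py count)

-- ===== LEMMAS AND PROOFS =====

-- the label for 0-based month index i, as a function of a natural number
def pvLbl (i : Nat) : String :=
  (pvMonths.getD (i % 12) "") ++ "'" ++ PySem.Int.toStr (24 + ((i / 12 : Nat) : Int))

lemma pvA_eq_map (count : Int) :
    generate_month_labels_py count = (List.range count.toNat).map pvLbl := by
  unfold generate_month_labels_py
  rw [PySem.List.pyRange_one, List.foldl_map, PySem.List.foldl_append_singleton_eq_map]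
  simp only [List.nil_append, sub_zero, zero_add]
  apply List.map_congr_left
  intro k _
  simp only [pvLbl]
  have hm : PySem.Int.mod (k : Int) 12 = ((k % 12 : Nat) : Int) := by
    exact_mod_cast PySem.Int.mod_natCast k 12
  have hd : PySem.Int.floordiv (k : Int) 12 = ((k / 12 : Nat) : Int) := by
    exact_mod_cast PySem.Int.floordiv_natCast k 12
  rw [hm, hd, PySem.List.pyGet?_natCast]
  have hlt : k % 12 < pvMonths.length := by simp [pvMonths]; omega
  rw [List.getElem?_eq_getElem hlt, List.getD_eq_getElem _ _ hlt]
  rfl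

-- one year of twelve labels, as a chunk of pvLbl values
lemma pvChunk (k : Nat) :
    (List.range 12).map (fun j => pvLbl (12 * k + j)) =
      pvMonths.map (fun m => m ++ ("'" ++ PySem.Int.toStr (24 + (k : Int)))) := by
  apply List.ext_getElem
  · simp [pvMonths]
  · intro j h1 h2
    have hj : j < 12 := by simpa using h1
    simp only [List.getElem_map, List.getElem_range, pvLbl]
    have h1' : (12 * k + j) % 12 = j := by omega
    have h2' : (12 * k + j) / 12 = k := by omega
    rw [h1', h2', List.getD_eq_getElem _ _ (by simpa [pvMonths] using hj), String.append_assoc]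

lemma pvFlat_eq_map (q : Nat) :
    (List.range q).flatMap
        (fun (y : Nat) => pvMonths.map (fun m => m ++ ("'" ++ PySem.Int.toStr (24 + (y : Int))))) =
      (List.range (12 * q)).map pvLbl := by
  induction q with
  | zero => simp
  | succ q ih =>
    rw [List.range_succ]
    simp only [List.flatMap_append, List.flatMap_cons, List.flatMap_nil, List.append_nil]
    rw [ih, Nat.mul_succ, List.range_add, List.map_append, List.map_map]
    congr 1
    rw [← pvChunk q]
    apply List.map_congr_left
    intro j _
    rfl

theorem pv_main (count : Int) :
    generate_month_labels_py count = generate_month_labels_py_alt count := by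
  by_cases h : count ≤ 0
  · have h0 : count.toNat = 0 := by omega
    simp only [generate_month_labels_py_alt, if_pos h]
    rw [pvA_eq_map, h0]
    simp
  · set n : Nat := count.toNat with hn
    have hcn : count = (n : Int) := by omega
    set q : Nat := (n + 11) / 12 with hq
    have hyears : PySem.Int.floordiv (count + 11) 12 = (q : Int) := by
      rw [hcn]; exact_mod_cast PySem.Int.floordiv_natCast (n + 11) 12
    simp only [generate_month_labels_py_alt, if_neg h]
    rw [hyears, PySem.List.pyRange_one]
    have hcast : ((q : Int) - 0).toNat = q := by omega
    rw [hcast, List.flatMap_map]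
    simp only [zero_add]
    rw [pvFlat_eq_map q, hcn, PySem.List.slice_to_natCast, pvA_eq_map]
    rw [← List.map_take, List.take_range]
    have hmin : min n (12 * q) = n := by omega
    rw [← hcn, ← hn, hmin]

-- ===== VERDICT (by name: the statement is the Claim_ definition above) =====
theorem generate_month_labels_py_spec : Claim_equal_generate_month_labels_py := by
  intro count _
  unfold Spec_generate_month_labels_py
  exact pv_main count
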